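-- pv_equiv track=rewrite | github.com/darevalog/Reto_1-Diego_Arevalo | mismos_caracteres.py | elementos_con_mismos_caracteres
-- ===== SOURCE A (Python) =====
-- def elementos_con_mismos_caracteres(lista):
--
--     """
--     La función "elementos_con_mismos_caracteres" toma una lista de cadenas y devuelve una lista de
--     tuplas que contienen pares de cadenas que tienen los mismos caracteres.
--
--     Args:
--       lista: El parámetro "lista" es una lista de cadenas.
--
--     Returns:
--       una lista de tuplas. Cada tupla contiene dos palabras de la lista de entrada que tienen los mismos
--     caracteres.
--     """
--
--     resultado = []
--
--     for i in range(len(lista)):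
--         palabra = sorted(list(lista[i]))
--         for j in range(i + 1, len(lista)):
--             otra_palabra = sorted(list(lista[j]))
--             if set(palabra) == set(otra_palabra):
--                 resultado.append((lista[i], lista[j]))
--
--     return resultado
-- ===== SOURCE B (Python) =====
-- def elementos_con_mismos_caracteres(lista):
--     # Group indices by frozenset-of-chars signature, then emit matching pairs
--     # in the original (i, j) order by scanning each word's group once.
--     firmas = [frozenset(palabra) for palabra in lista]
--     grupos = {}
--     for idx, firma in enumerate(firmas):
--         grupos.setdefault(firma, []).append(idx)
--     resultado = []
--     for i, palabra in enumerate(lista):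
--         for j in grupos[firmas[i]]:
--             if j > i:
--                 resultado.append((palabra, lista[j]))
--     return resultado
-- ===== Notes on version B (the rewrite author's own statement) =====
-- stated objective: alternative
-- what changed: B computes each word's frozenset signature once, groups indices by signature in a dict, and emits each word's matching later partners by scanning only its own group (preserving A's (i, j) output order), instead of A's all-pairs scan that re-sorts and re-builds both character sets for every pair; intended as faster (measured ~4.4x at n=1024, unconfirmed at the largest size where both timed out on pair-heavy inputs).
import Mathlib
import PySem

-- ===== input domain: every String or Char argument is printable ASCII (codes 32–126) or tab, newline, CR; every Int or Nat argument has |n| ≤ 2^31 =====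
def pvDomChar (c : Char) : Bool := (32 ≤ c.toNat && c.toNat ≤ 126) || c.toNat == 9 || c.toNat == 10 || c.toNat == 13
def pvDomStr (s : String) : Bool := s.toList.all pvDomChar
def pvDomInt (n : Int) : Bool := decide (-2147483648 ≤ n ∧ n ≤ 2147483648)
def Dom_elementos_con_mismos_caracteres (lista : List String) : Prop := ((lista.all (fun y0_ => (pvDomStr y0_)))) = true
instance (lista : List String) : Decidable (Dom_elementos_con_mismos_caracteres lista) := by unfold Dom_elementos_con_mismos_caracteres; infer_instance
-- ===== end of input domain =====

-- B groups word indices by frozenset-of-characters signature and scans only each word's own group,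
-- instead of A's all-pairs scan with per-pair sorting; same return value on every input (alternative algorithm).


-- ===== PORT A =====
def elementos_con_mismos_caracteres (lista : List String) : List (String × String) :=
  (PySem.List.pyRange 0 (PySem.List.len lista)).foldl (fun resultado i =>
    let palabra := PySem.List.sorted (PySem.List.pyGetD lista i "").toList (fun x => x)
    (PySem.List.pyRange (i + 1) (PySem.List.len lista)).foldl (fun resultado j =>
      let otra_palabra := PySem.List.sorted (PySem.List.pyGetD lista j "").toList (fun x => x)
      if PySem.Set.equal (PySem.Set.ofList palabra) (PySem.Set.ofList otra_palabra) then
        resultado ++ [(PySem.List.pyGetD lista i "", PySem.List.pyGetD lista j "")]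
      else resultado) resultado) []

-- ===== PORT B =====
-- frozenset(palabra) encoded canonically as the sorted list of distinct characters
-- (exact: two Python frozensets are equal iff these canonical lists are equal)
def pvFrozenset (s : String) : List Char :=
  PySem.List.sorted (PySem.Set.ofList s.toList) (fun x => x)

def elementos_con_mismos_caracteres_alt (lista : List String) : List (String × String) :=
  let firmas := lista.map pvFrozenset
  let grupos : PySem.Dict (List Char) (List Int) :=
    (PySem.List.enumerate firmas).foldl
      (fun d p => d.modify p.2 [] (fun v => v ++ [p.1])) PySem.Dict.empty
  (PySem.List.enumerate lista).foldl (fun resultado q =>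
    (grupos.getD (PySem.List.pyGetD firmas q.1 []) []).foldl (fun resultado j =>
      if j > q.1 then resultado ++ [(q.2, PySem.List.pyGetD lista j "")] else resultado)
      resultado) []

-- ===== PRECONDITION & SPEC =====
def Spec_elementos_con_mismos_caracteres (lista : List String) (out : List (String × String)) : Prop := out = elementos_con_mismos_caracteres_alt lista
instance (lista : List String) (out : List (String × String)) : Decidable (Spec_elementos_con_mismos_caracteres lista out) := by unfold Spec_elementos_con_mismos_caracteres; infer_instance

-- ===== CLAIM (what is proved, stated in full; the proofs are below) =====
def Claim_equal_elementos_con_mismos_caracteres : Prop := ∀ (lista : List String), Dom_elementos_con_mismos_caracteres lista → Spec_elementos_con_mismos_caracteres lista (elementos_con_mismos_caracteres lista)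

-- ===== LEMMAS AND PROOFS =====

-- membership in the canonical frozenset encoding is membership in the string
lemma mem_pvFrozenset (u : String) (x : Char) : x ∈ pvFrozenset u ↔ x ∈ u.toList := by
  simp [pvFrozenset, PySem.List.mem_sorted, PySem.Set.mem_ofList]

-- two canonical encodings are equal iff the strings use the same characters
lemma pvFrozenset_eq_iff (s t : String) :
    pvFrozenset s = pvFrozenset t ↔ ∀ x, x ∈ s.toList ↔ x ∈ t.toList := by
  constructor
  · intro h x
    rw [← mem_pvFrozenset s, h, mem_pvFrozenset]
  · intro h
    have hn1 : (pvFrozenset s).Nodup :=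
      ((PySem.List.sorted_perm _ _ _).symm.nodup (PySem.Set.nodup_ofList _))
    have hn2 : (pvFrozenset t).Nodup :=
      ((PySem.List.sorted_perm _ _ _).symm.nodup (PySem.Set.nodup_ofList _))
    have hp : (pvFrozenset s).Perm (pvFrozenset t) :=
      (List.perm_ext_iff_of_nodup hn1 hn2).mpr
        (fun x => by rw [mem_pvFrozenset, mem_pvFrozenset]; exact h x)
    exact hp.eq_of_pairwise (fun a b _ _ hab hba => absurd hba (lt_asymm hab))
      (PySem.List.sorted_ofList_pairwise_lt _) (PySem.List.sorted_ofList_pairwise_lt _)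

-- A's comparison of the two character sets IS equality of the canonical encodings
lemma setEqual_eq_pvFrozenset_beq (s t : String) :
    PySem.Set.equal (PySem.Set.ofList (PySem.List.sorted s.toList (fun x => x)))
      (PySem.Set.ofList (PySem.List.sorted t.toList (fun x => x)))
    = (pvFrozenset s == pvFrozenset t) := by
  rw [Bool.eq_iff_iff, PySem.Set.equal_iff, beq_iff_eq, pvFrozenset_eq_iff]
  simp only [PySem.Set.mem_ofList, PySem.List.mem_sorted]

lemma pyGetD_map_pvFrozenset (lista : List String) (j : Int) :
    PySem.List.pyGetD (lista.map pvFrozenset) j [] = pvFrozenset (PySem.List.pyGetD lista j "") := by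
  rw [show ([] : List Char) = pvFrozenset "" from rfl, PySem.List.pyGetD_map]

-- the group stored under key c is exactly the ascending list of indices whose word has signature c
lemma group_getD (lista : List String) (c : List Char) :
    ((PySem.List.enumerate (lista.map pvFrozenset)).foldl
        (fun d p => d.modify p.2 [] (fun v => v ++ [p.1])) PySem.Dict.empty).getD c []
    = (PySem.List.pyRange 0 (PySem.List.len lista)).filter
        (fun j => pvFrozenset (PySem.List.pyGetD lista j "") == c) := by
  rw [PySem.List.enumerate_eq_map_pyRange (lista.map pvFrozenset) [], List.foldl_map,
    ← List.foldl_map (f := fun j : Int => (PySem.List.pyGetD (lista.map pvFrozenset) j [], j))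
      (g := fun (d : PySem.Dict (List Char) (List Int)) p => d.modify p.1 [] (fun v => v ++ [p.2])),
    PySem.Dict.getD_foldl_modify_append]
  simp only [List.filter_map, List.map_map, pyGetD_map_pvFrozenset, PySem.List.len_eq,
    List.length_map, Function.comp_def, List.map_id_fun', id]
  show PySem.Dict.empty.getD c [] ++ _ = _
  rw [show PySem.Dict.empty.getD c ([] : List Int) = [] from rfl, List.nil_append]

-- the per-word scan of a group equals A's inner scan over the later indices
lemma per_index (lista : List String) (i : Int) (h0 : 0 ≤ i) (hn : i < PySem.List.len lista) :
    ((PySem.List.pyRange 0 (PySem.List.len lista)).filter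
        (fun j => pvFrozenset (PySem.List.pyGetD lista j "") == pvFrozenset (PySem.List.pyGetD lista i ""))).filter
      (fun j => decide (i < j))
    = (PySem.List.pyRange (i + 1) (PySem.List.len lista)).filter
        (fun j => pvFrozenset (PySem.List.pyGetD lista i "") == pvFrozenset (PySem.List.pyGetD lista j "")) := by
  rw [List.filter_filter,
    PySem.List.pyRange_one_append 0 (i + 1) (PySem.List.len lista) (by omega) (by omega),
    List.filter_append]
  have h1 : (PySem.List.pyRange 0 (i + 1)).filter
      (fun j => decide (i < j) &&
        (pvFrozenset (PySem.List.pyGetD lista j "") == pvFrozenset (PySem.List.pyGetD lista i ""))) = [] := by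
    apply List.filter_eq_nil_iff.mpr
    intro j hj
    rw [PySem.List.mem_pyRange_one] at hj
    simp only [Bool.and_eq_true, decide_eq_true_eq, not_and]
    intro h
    omega
  rw [h1, List.nil_append]
  apply List.filter_congr
  intro j hj
  rw [PySem.List.mem_pyRange_one] at hj
  have hij : decide (i < j) = true := by simp; omega
  rw [hij, Bool.true_and, Bool.eq_iff_iff, beq_iff_eq, beq_iff_eq]
  exact eq_comm

-- ===== VERDICT (by name: the statement is the Claim_ definition above) =====
theorem elementos_con_mismos_caracteres_spec : Claim_equal_elementos_con_mismos_caracteres := by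
  intro lista _
  unfold Spec_elementos_con_mismos_caracteres
  unfold elementos_con_mismos_caracteres elementos_con_mismos_caracteres_alt
  rw [PySem.List.enumerate_eq_map_pyRange lista "", List.foldl_map]
  simp only [pyGetD_map_pvFrozenset, group_getD, setEqual_eq_pvFrozenset_beq,
    PySem.List.foldl_append_if, PySem.List.foldl_append_eq_flatMap, List.nil_append,
    PySem.List.len_eq]
  have inner_fold : ∀ (i : Int) (l : List Int) (res : List (String × String)),
      l.foldl (fun r j => if j > i then
          r ++ [(PySem.List.pyGetD lista i "", PySem.List.pyGetD lista j "")] else r) res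
      = res ++ (l.filter (fun j => decide (i < j))).map
          (fun j => (PySem.List.pyGetD lista i "", PySem.List.pyGetD lista j "")) := by
    intro i l
    induction l with
    | nil => simp
    | cons x t ih =>
      intro res
      by_cases h : i < x
      · simp [h, ih]
      · simp [h, ih]
  simp only [inner_fold, PySem.List.foldl_append_eq_flatMap, List.nil_append]
  simp only [List.flatMap_def]
  congr 1
  apply List.map_congr_left
  intro i hi
  rw [PySem.List.mem_pyRange_one] at hi
  have hp := per_index lista i hi.1 (by rw [PySem.List.len_eq]; exact hi.2)
  simp only [PySem.List.len_eq] at hp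
  rw [hp]
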